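-- pv_equiv track=rewrite | github.com/nav-mtl/Email-Header-Analyzer | Analyzer.py | parse_email_headers
-- ===== SOURCE A (Python) =====
-- def parse_email_headers(headers):
--     header_lines = headers.split('\n')
--     parsed_headers = {}
--     for line in header_lines:
--         if ': ' in line:
--             key, value = line.split(': ', 1)
--             if key not in parsed_headers:
--                 parsed_headers[key] = value
--             else:
--                 parsed_headers[key] += f"\n{value}"
--     return parsed_headers
-- ===== SOURCE B (Python) =====
-- def parse_email_headers(headers):
--     pairs = [tuple(line.split(': ', 1)) for line in headers.split('\n') if ': ' in line]
--     result = {}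
--     for key, _ in pairs:
--         if key not in result:
--             result[key] = '\n'.join(v for k, v in pairs if k == key)
--     return result
-- ===== Notes on version B (the rewrite author's own statement) =====
-- stated objective: alternative
-- what changed: B is a staged group-by: it first materialises the full list of (key, value) pairs, then for each first occurrence of a key builds the whole joined value at once by scanning the pair list, instead of A's single pass that grows each dict value incrementally per line.
import Mathlib
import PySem

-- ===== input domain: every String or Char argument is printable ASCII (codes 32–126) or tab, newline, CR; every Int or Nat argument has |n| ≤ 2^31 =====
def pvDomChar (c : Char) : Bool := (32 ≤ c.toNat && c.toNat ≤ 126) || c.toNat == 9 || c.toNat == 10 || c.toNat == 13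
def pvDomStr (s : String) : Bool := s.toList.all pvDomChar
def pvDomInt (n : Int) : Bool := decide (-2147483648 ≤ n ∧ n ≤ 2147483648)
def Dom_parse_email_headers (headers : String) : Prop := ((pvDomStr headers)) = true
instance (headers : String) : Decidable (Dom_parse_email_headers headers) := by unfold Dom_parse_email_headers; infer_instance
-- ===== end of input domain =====

-- B is a staged group-by: it first collects all (key, value) pairs, then, per first
-- occurrence of a key, builds the whole '\n'-joined value at once by scanning the pair
-- list — instead of A's single pass that grows each dict value incrementally (alternative).

-- ===== PORT A =====
def parse_email_headers (headers : String) : List (String × String) :=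
  let header_lines := (PySem.Str.split? headers "\n").getD []
  let parsed_headers := header_lines.foldl (fun d line =>
    if PySem.Str.isIn ": " line then
      let parts := (PySem.Str.splitMax? line ": " 1).getD []
      let key := parts.getD 0 ""
      let value := parts.getD 1 ""
      if d.contains key = false then d.insert key value
      else d.modify key "" (fun s => s ++ "\n" ++ value)
    else d) PySem.Dict.empty
  parsed_headers.items

-- ===== PORT B =====
def parse_email_headers_alt (headers : String) : List (String × String) :=
  let pairs := (((PySem.Str.split? headers "\n").getD []).filter
      (fun l => PySem.Str.isIn ": " l)).map
      (fun l =>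
        let parts := (PySem.Str.splitMax? l ": " 1).getD []
        (parts.getD 0 "", parts.getD 1 ""))
  let result := pairs.foldl (fun r p =>
    if r.contains p.1 = false then
      r.insert p.1 (PySem.Str.join "\n" ((pairs.filter (fun q => q.1 == p.1)).map (fun q => q.2)))
    else r) PySem.Dict.empty
  result.items

-- ===== PRECONDITION & SPEC =====
def Spec_parse_email_headers (headers : String) (out : List (String × String)) : Prop := out = parse_email_headers_alt headers
instance (headers : String) (out : List (String × String)) : Decidable (Spec_parse_email_headers headers out) := by unfold Spec_parse_email_headers; infer_instance

-- ===== CLAIM =====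
def Claim_equal_parse_email_headers : Prop := ∀ (headers : String), Dom_parse_email_headers headers → Spec_parse_email_headers headers (parse_email_headers headers)

-- ===== LEMMAS AND PROOFS =====

-- value list of key k inside a pair list
def valsOf (k : String) (ps : List (String × String)) : List String :=
  (ps.filter (fun q => q.1 == k)).map (fun q => q.2)

-- A's incremental accumulation of further values onto an existing string
def extendV (s : String) (vs : List String) : String :=
  vs.foldl (fun a v => a ++ "\n" ++ v) s

-- folding over (l.filter c).map m is folding over l with a guarded body
lemma foldl_filter_map {α β γ : Type} (c : α → Bool) (m : α → β) (g : γ → β → γ) :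
    ∀ (l : List α) (init : γ),
    ((l.filter c).map m).foldl g init
      = l.foldl (fun d x => if c x then g d (m x) else d) init := by
  intro l
  induction l with
  | nil => intro init; rfl
  | cons x t ih =>
    intro init
    by_cases h : c x = true <;> simp [h, ih]

lemma chars_join_cons_eq_foldl (sep : List Char) :
    ∀ (vs : List (List Char)) (v : List Char),
    PySem.Chars.join sep (v :: vs) = vs.foldl (fun a w => a ++ sep ++ w) v := by
  intro vs
  induction vs with
  | nil => intro v; simp [PySem.Chars.join_singleton]
  | cons w t ih =>
    intro v
    have h1 : PySem.Chars.join sep (v :: w :: t) = PySem.Chars.join sep ((v ++ sep ++ w) :: t) := by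
      cases t with
      | nil => simp [PySem.Chars.join_cons_cons, PySem.Chars.join_singleton]
      | cons b t' => simp [PySem.Chars.join_cons_cons]
    rw [h1, ih (v ++ sep ++ w)]
    rfl

-- '\n'.join(v :: vs) is A's incremental accumulation starting at v
lemma extendV_cons (s v : String) (vs : List String) :
    extendV s (v :: vs) = extendV (s ++ "\n" ++ v) vs := rfl

lemma extendV_toList :
    ∀ (vs : List String) (v : String),
    (extendV v vs).toList = (vs.map String.toList).foldl (fun a w => a ++ "\n".toList ++ w) v.toList := by
  intro vs
  induction vs with
  | nil => intro v; rfl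
  | cons w t ih =>
    intro v
    rw [extendV_cons, List.map_cons, List.foldl_cons, ih]
    simp [String.toList_append]

lemma str_join_cons_eq_extend (v : String) (vs : List String) :
    PySem.Str.join "\n" (v :: vs) = extendV v vs := by
  apply String.ext
  rw [PySem.Str.toList_join, List.map_cons, chars_join_cons_eq_foldl, extendV_toList]

lemma valsOf_cons_self (k v : String) (t : List (String × String)) :
    valsOf k ((k, v) :: t) = v :: valsOf k t := by
  simp [valsOf]

lemma valsOf_cons_ne (q k v : String) (t : List (String × String)) (h : k ≠ q) :
    valsOf q ((k, v) :: t) = valsOf q t := by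
  simp [valsOf, h]

-- main invariant: while walking the pair list, A's dict entry for each key k carries the
-- values of k seen so far, B's carries the join over ALL of k's values; they are related by
-- extending A's entry with k's remaining values.
lemma main_inv (all : List (String × String)) :
    ∀ (rest pre : List (String × String)) (dA rB : PySem.Dict String String),
    all = pre ++ rest →
    (∀ q ∈ pre, dA.contains q.1 = true) →
    dA.keys.Nodup →
    rB.items = dA.items.map (fun p => (p.1, extendV p.2 (valsOf p.1 rest))) →
    (rest.foldl (fun d p =>
        if d.contains p.1 = false then d.insert p.1 p.2
        else d.modify p.1 "" (fun s => s ++ "\n" ++ p.2)) dA).items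
    = (rest.foldl (fun r p =>
        if r.contains p.1 = false then r.insert p.1 (PySem.Str.join "\n" (valsOf p.1 all))
        else r) rB).items := by
  intro rest
  induction rest with
  | nil =>
    intro pre dA rB _ _ _ h4
    simp only [List.foldl_nil]
    have : rB.items = dA.items := by
      rw [h4]; simp [valsOf, extendV]
    exact this.symm
  | cons p0 t ih =>
    intro pre dA rB h1 h2 h3 h4
    obtain ⟨k, v⟩ := p0
    have hkeys : rB.keys = dA.keys := by
      simp only [PySem.Dict.keys, h4, List.map_map]; rfl
    have hcont : rB.contains k = dA.contains k := by
      rw [PySem.Dict.contains_eq_decide_mem_keys, PySem.Dict.contains_eq_decide_mem_keys, hkeys]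
    by_cases hc : dA.contains k = true
    · -- existing key: A appends to its entry, B leaves its (already final) entry alone
      have hcB : rB.contains k = true := hcont.trans hc
      simp only [List.foldl_cons, hc, hcB, PySem.Dict.modify,
        Bool.true_eq_false, if_false]
      apply ih (pre ++ [(k, v)])
      · simpa [List.append_assoc] using h1
      · intro q hq
        rcases List.mem_append.mp hq with hql | hqr
        · rw [PySem.Dict.contains_insert]; simp [h2 q hql]
        · simp at hqr; subst hqr; exact PySem.Dict.contains_insert_self _ _ _
      · exact PySem.Dict.nodup_keys_insert _ _ _ h3
      · rw [PySem.Dict.items_insert_of_contains _ _ hc, h4, List.map_map]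
        apply List.map_congr_left
        intro p hp
        by_cases hpk : p.1 = k
        · have hgA : dA.getD k "" = p.2 := by
            have : (k, p.2) ∈ dA.items := by rw [← hpk]; exact hp
            exact PySem.Dict.getD_of_mem_items dA this h3 ""
          simp only [Function.comp, hpk, BEq.rfl, if_true, hgA,
            valsOf_cons_self, extendV_cons]
        · have hbeq : (p.1 == k) = false := by simp [hpk]
          simp [Function.comp, hbeq, valsOf_cons_ne p.1 k v t (Ne.symm hpk)]
    · -- fresh key: both append a new entry; B's entry is the final join of all of k's values
      have hcA : dA.contains k = false := by simpa using hc
      have hcB : rB.contains k = false := hcont.trans hcA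
      have hknotin : k ∉ dA.keys := by
        have := PySem.Dict.contains_eq_decide_mem_keys (d := dA) (k := k)
        rw [hcA] at this
        simpa using this.symm
      simp only [List.foldl_cons, hcA, hcB, if_true]
      apply ih (pre ++ [(k, v)])
      · simpa [List.append_assoc] using h1
      · intro q hq
        rcases List.mem_append.mp hq with hql | hqr
        · rw [PySem.Dict.contains_insert]; simp [h2 q hql]
        · simp at hqr; subst hqr; exact PySem.Dict.contains_insert_self _ _ _
      · exact PySem.Dict.nodup_keys_insert _ _ _ h3
      · have hpreK : valsOf k pre = [] := by
          unfold valsOf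
          rw [List.filter_eq_nil_iff.mpr, List.map_nil]
          intro q hq
          have hqc := h2 q hq
          have : q.1 ∈ dA.keys := by
            have := PySem.Dict.contains_eq_decide_mem_keys (d := dA) (k := q.1)
            rw [hqc] at this
            simpa using this.symm
          have hne : q.1 ≠ k := fun he => hknotin (he ▸ this)
          simp [hne]
        have hall : valsOf k all = v :: valsOf k t := by
          rw [h1]
          unfold valsOf
          rw [List.filter_append, List.map_append]
          have : (pre.filter (fun q => q.1 == k)).map (fun q => q.2) = [] := hpreK
          rw [this, List.nil_append]
          simp
        rw [PySem.Dict.items_insert_of_not_contains _ _ hcB,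
            PySem.Dict.items_insert_of_not_contains _ _ hcA,
            List.map_append, h4]
        have hrw : dA.items.map (fun p => (p.1, extendV p.2 (valsOf p.1 ((k, v) :: t))))
            = dA.items.map (fun p => (p.1, extendV p.2 (valsOf p.1 t))) := by
          apply List.map_congr_left
          intro p hp
          have hpm : p.1 ∈ dA.keys := by
            simp only [PySem.Dict.keys]
            exact List.mem_map_of_mem hp
          have hpk : p.1 ≠ k := fun he => hknotin (he ▸ hpm)
          rw [valsOf_cons_ne p.1 k v t (Ne.symm hpk)]
        rw [hrw, hall, str_join_cons_eq_extend]
        simp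

-- the two folds over an arbitrary pair list agree (instance of the invariant at the start state)
lemma folds_agree (ps : List (String × String)) :
    (ps.foldl (fun d p =>
        if d.contains p.1 = false then d.insert p.1 p.2
        else d.modify p.1 "" (fun s => s ++ "\n" ++ p.2)) PySem.Dict.empty).items
    = (ps.foldl (fun r p =>
        if r.contains p.1 = false then r.insert p.1 (PySem.Str.join "\n" (valsOf p.1 ps))
        else r) PySem.Dict.empty).items :=
  main_inv ps ps [] PySem.Dict.empty PySem.Dict.empty rfl (by intro q hq; simp at hq)
    PySem.Dict.nodup_keys_empty (by rfl)

-- ===== VERDICT (by name: the statement is the Claim_ definition above) =====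
theorem parse_email_headers_spec : Claim_equal_parse_email_headers := by
  intro headers _
  unfold Spec_parse_email_headers parse_email_headers parse_email_headers_alt
  show (((PySem.Str.split? headers "\n").getD []).foldl (fun d line =>
      if PySem.Str.isIn ": " line then
        (fun d (p : String × String) =>
          if d.contains p.1 = false then d.insert p.1 p.2
          else d.modify p.1 "" (fun s => s ++ "\n" ++ p.2)) d
          ((fun l =>
            let parts := (PySem.Str.splitMax? l ": " 1).getD []
            (parts.getD 0 "", parts.getD 1 "")) line)
      else d) PySem.Dict.empty).items
    = _
  rw [← foldl_filter_map (fun l => PySem.Str.isIn ": " l)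
        (fun l =>
          let parts := (PySem.Str.splitMax? l ": " 1).getD []
          (parts.getD 0 "", parts.getD 1 ""))
        (fun d (p : String × String) =>
          if d.contains p.1 = false then d.insert p.1 p.2
          else d.modify p.1 "" (fun s => s ++ "\n" ++ p.2))
        ((PySem.Str.split? headers "\n").getD []) PySem.Dict.empty]
  exact folds_agree _
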